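-- pv_equiv track=rewrite | github.com/jezonek/pattern_recognition | pattern_recognition.py | find_repetitions
-- ===== SOURCE A (Python) =====
-- from itertools import zip_longest, takewhile
--
-- def find_repetitions(regex_list):
--     """For each character in the list, the generator calculates successive occurrences
--     :param regex_list: List of consecutive objects in estimated regex
--     :type list
--     :return: Subsequent occurrences of a character
--     :rtype: int
--     """
--     for element in enumerate(regex_list):
--         count = 0
--         for one_try in takewhile(
--             lambda x: x == element[1], regex_list[(element[0] + 1) :]
--         ):
--             count = count + 1
--         yield count
-- ===== SOURCE B (Python) =====
-- def find_repetitions(regex_list):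
--     """Single backward pass: count[i] = count[i+1] + 1 if regex_list[i+1] == regex_list[i], else 0."""
--     n = len(regex_list)
--     counts = [0] * n
--     for i in range(n - 2, -1, -1):
--         if regex_list[i] == regex_list[i + 1]:
--             counts[i] = counts[i + 1] + 1
--     yield from counts
-- ===== Notes on version B (the rewrite author's own statement) =====
-- stated objective: faster
-- what changed: Replaces the per-index takewhile rescan of the suffix with a single right-to-left pass that reuses the next index's count (count[i] = count[i+1]+1 when neighbours are equal, else 0).
import Mathlib
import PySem

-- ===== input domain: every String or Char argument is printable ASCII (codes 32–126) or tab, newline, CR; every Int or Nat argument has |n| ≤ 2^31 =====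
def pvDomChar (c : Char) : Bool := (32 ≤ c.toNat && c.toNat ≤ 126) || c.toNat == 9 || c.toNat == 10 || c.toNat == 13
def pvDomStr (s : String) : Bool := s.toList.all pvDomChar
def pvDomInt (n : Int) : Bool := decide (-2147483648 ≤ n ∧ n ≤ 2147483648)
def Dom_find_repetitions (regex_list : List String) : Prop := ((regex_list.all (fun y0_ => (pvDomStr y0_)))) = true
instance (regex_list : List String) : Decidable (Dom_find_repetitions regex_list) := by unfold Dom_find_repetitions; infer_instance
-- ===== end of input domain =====

-- B replaces A's per-index takewhile rescan of the suffix by a single backward pass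
-- reusing the next index's count (objective: faster, O(n^2) -> O(n)).
-- A is a Python generator; both sides are compared as the list of yielded values.

-- ===== PORT A =====
-- for element in enumerate(regex_list): count = 0; for one_try in takewhile(lambda x: x == element[1], regex_list[element[0]+1:]): count += 1; yield count
-- regex_list[(element[0]+1):] is PySem.List.slice with start element.1 + 1 (exact: index ≥ 1 here).
def find_repetitions (regex_list : List String) : List Int :=
  (PySem.List.enumerate regex_list).map (fun element =>
    ((PySem.List.slice regex_list (some (element.1 + 1)) none).takeWhile
        (fun x => x == element.2)).foldl (fun count _ => count + 1) 0)

-- ===== PORT B =====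
-- Source B's backward pass counts[i] = counts[i+1] + 1 if regex_list[i] == regex_list[i+1] else 0,
-- rendered as the structurally equivalent right-to-left recursion over the list.
def find_repetitions_alt : List String → List Int
  | [] => []
  | [_] => [0]
  | x :: y :: rest =>
      let t := find_repetitions_alt (y :: rest)
      (if x == y then t.headD 0 + 1 else 0) :: t

-- ===== PRECONDITION & SPEC =====
def Spec_find_repetitions (regex_list : List String) (out : List Int) : Prop := out = find_repetitions_alt regex_list
instance (regex_list : List String) (out : List Int) : Decidable (Spec_find_repetitions regex_list out) := by unfold Spec_find_repetitions; infer_instance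

-- ===== CLAIM (what is proved, stated in full; the proofs are below) =====
def Claim_equal_find_repetitions : Prop := ∀ (regex_list : List String), Dom_find_repetitions regex_list → Spec_find_repetitions regex_list (find_repetitions regex_list)

-- ===== LEMMAS AND PROOFS =====

-- A's inner loop just counts the takewhile elements.
theorem pv_foldl_count (l : List String) (c : Int) :
    l.foldl (fun count _ => count + 1) c = c + l.length := by
  induction l generalizing c with
  | nil => simp
  | cons x xs ih => simp [List.foldl, ih]; omega

-- Closed recursion computing A's value: specA L xs s = counts for the elements xs of L starting at index s.
def specA (L : List String) : List String → Nat → List Int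
  | [], _ => []
  | x :: xs, s => (((L.drop (s + 1)).takeWhile (fun y => y == x)).length : Int) :: specA L xs (s + 1)

theorem pv_A_eq_specA_aux (L : List String) (xs : List String) (s : Nat) :
    (PySem.List.enumerate xs (s : Int)).map (fun element =>
      ((PySem.List.slice L (some (element.1 + 1)) none).takeWhile
          (fun x => x == element.2)).foldl (fun count _ => count + 1) 0)
      = specA L xs s := by
  induction xs generalizing s with
  | nil => simp [PySem.List.enumerate_nil, specA]
  | cons x xs ih =>
    have h1 : ((s : Int) + 1) = ((s + 1 : Nat) : Int) := by push_cast; ring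
    rw [PySem.List.enumerate_cons, List.map_cons, h1, ih]
    simp [specA, pv_foldl_count]
    rw [h1, PySem.List.slice_from_natCast]

theorem pv_A_eq_specA (L : List String) : find_repetitions L = specA L L 0 := by
  have := pv_A_eq_specA_aux L L 0
  simpa [find_repetitions, PySem.List.enumerate] using this

-- Dropping the head of the context shifts the start index.
theorem pv_specA_shift (a : String) (L : List String) (xs : List String) (s : Nat) :
    specA (a :: L) xs (s + 1) = specA L xs s := by
  induction xs generalizing s with
  | nil => simp [specA]
  | cons x xs ih => simp [specA, List.drop, ih]

theorem pv_specA_eq_alt : ∀ (L : List String), specA L L 0 = find_repetitions_alt L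
  | [] => by simp [specA, find_repetitions_alt]
  | [x] => by simp [specA, find_repetitions_alt]
  | x :: y :: rest => by
    have ih := pv_specA_eq_alt (y :: rest)
    have hhead : (find_repetitions_alt (y :: rest)).headD 0
        = ((rest.takeWhile (fun z => z == y)).length : Int) := by
      rw [← ih]; simp [specA]
    have hmain : specA (x :: y :: rest) (x :: y :: rest) 0
        = (((y :: rest).takeWhile (fun z => z == x)).length : Int)
          :: find_repetitions_alt (y :: rest) := by
      show _ :: specA (x :: y :: rest) (y :: rest) 1 = _
      rw [pv_specA_shift, ih]
      norm_num
    rw [hmain]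
    show _ = (if x == y then (find_repetitions_alt (y :: rest)).headD 0 + 1 else 0)
          :: find_repetitions_alt (y :: rest)
    congr 1
    by_cases hxy : x = y
    · subst hxy
      rw [if_pos (by simp), hhead]
      simp
    · rw [if_neg (by simpa using hxy)]
      have hyx : (y == x) = false := by simp; exact fun h => hxy h.symm
      simp [hyx]

-- ===== VERDICT (by name: the statement is the Claim_ definition above) =====
theorem find_repetitions_spec : Claim_equal_find_repetitions := by
  intro L _
  unfold Spec_find_repetitions
  rw [pv_A_eq_specA, pv_specA_eq_alt]
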